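-- pv_equiv track=rewrite | github.com/KendrickNguyen76/spacetime-crawler4py | longest_page_analyzer/longest_page.py | get_alphanumeric_words_from_line
-- ===== SOURCE A (Python) =====
-- def get_alphanumeric_words_from_line(line_of_text : list[str]) -> list[str]:
--     line_of_text += "\n"
--     curr_word = ""
--     words = []
--
--     for i in range(len(line_of_text)):
--         code = ord(line_of_text[i].lower())
--
--         if (48 <= code <= 57 or 97 <= code <= 122):
--             curr_word += chr(code)
--         else:
--             if len(curr_word) > 0:
--                 words.append(curr_word)
--                 curr_word = ""
--
--     return words
-- ===== SOURCE B (Python) =====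
-- def get_alphanumeric_words_from_line(line_of_text):
--     # Two-pointer run scan over the pre-lowered characters: no sentinel, no
--     # running accumulator string.
--     low = [ch.lower() for ch in line_of_text]
--
--     def alnum(c):
--         code = ord(c)
--         return 48 <= code <= 57 or 97 <= code <= 122
--
--     words = []
--     n = len(low)
--     i = 0
--     while i < n:
--         if alnum(low[i]):
--             j = i
--             while j < n and alnum(low[j]):
--                 j += 1
--             words.append("".join(low[i:j]))
--             i = j
--         else:
--             i += 1
--     return words
-- ===== Notes on version B (the rewrite author's own statement) =====
-- stated objective: alternative
-- what changed: Replaces A's per-character state machine (running curr_word accumulator plus an appended newline sentinel that flushes it) by a two-pointer run scan over the pre-lowered characters: each maximal alphanumeric run is located with an inner pointer and joined in one step.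
import Mathlib
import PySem

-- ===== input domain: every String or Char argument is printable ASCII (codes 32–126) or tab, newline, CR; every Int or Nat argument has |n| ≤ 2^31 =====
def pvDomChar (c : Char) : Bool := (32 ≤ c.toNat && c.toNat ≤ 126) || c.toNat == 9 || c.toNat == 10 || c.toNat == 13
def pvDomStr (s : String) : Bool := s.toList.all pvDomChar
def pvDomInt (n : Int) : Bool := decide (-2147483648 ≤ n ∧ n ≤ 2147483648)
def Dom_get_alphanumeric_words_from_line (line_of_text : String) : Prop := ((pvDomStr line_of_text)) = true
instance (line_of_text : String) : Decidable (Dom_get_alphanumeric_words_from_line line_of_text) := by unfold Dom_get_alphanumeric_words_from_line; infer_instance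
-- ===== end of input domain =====

-- B replaces A's newline-sentinel per-character accumulator state machine by a
-- two-pointer run scan over the pre-lowered characters (alternative decomposition, same cost).


-- ===== PORT A =====
-- 48 <= code <= 57 or 97 <= code <= 122  (code : Int, Python's ord result)
def pvAlnumCode (code : Int) : Bool := (48 ≤ code && code ≤ 57) || (97 ≤ code && code ≤ 122)

-- the for-loop over the characters, state = (curr_word, words)
def pvLoopA : List Char → List Char → List String → List String
  | [], _, words => words
  | c :: rest, curr, words =>
    let code : Int := ((PySem.Chars.lowerChar c).toNat : Int)
    if pvAlnumCode code then
      pvLoopA rest (curr ++ [Char.ofNat code.toNat]) words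
    else if curr.length > 0 then
      pvLoopA rest [] (words ++ [String.ofList curr])
    else
      pvLoopA rest curr words

-- line_of_text += "\n" (on the character list), then the indexed for-loop
def get_alphanumeric_words_from_line (line_of_text : String) : List String :=
  pvLoopA (line_of_text.toList ++ ['\n']) [] []

-- ===== PORT B =====
def pvAlnumChar (c : Char) : Bool := (48 ≤ c.toNat && c.toNat ≤ 57) || (97 ≤ c.toNat && c.toNat ≤ 122)

-- two-pointer run scan: skip a non-alnum char, or take a maximal alnum run
def pvScanB : List Char → List String
  | [] => []
  | c :: rest =>
    if pvAlnumChar c then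
      String.ofList (c :: rest.takeWhile pvAlnumChar) :: pvScanB (rest.dropWhile pvAlnumChar)
    else pvScanB rest
termination_by cs => cs.length
decreasing_by
  · exact Nat.lt_succ_of_le (List.length_dropWhile_le ..)
  · simp

def get_alphanumeric_words_from_line_alt (line_of_text : String) : List String :=
  pvScanB (line_of_text.toList.map PySem.Chars.lowerChar)

-- ===== PRECONDITION & SPEC =====
def Spec_get_alphanumeric_words_from_line (line_of_text : String) (out : List String) : Prop := out = get_alphanumeric_words_from_line_alt line_of_text
instance (line_of_text : String) (out : List String) : Decidable (Spec_get_alphanumeric_words_from_line line_of_text out) := by unfold Spec_get_alphanumeric_words_from_line; infer_instance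

-- ===== CLAIM (what is proved, stated in full; the proofs are below) =====
def Claim_equal_get_alphanumeric_words_from_line : Prop := ∀ (line_of_text : String), Dom_get_alphanumeric_words_from_line line_of_text → Spec_get_alphanumeric_words_from_line line_of_text (get_alphanumeric_words_from_line line_of_text)

-- ===== LEMMAS AND PROOFS =====

-- A's loop restated as a state machine over the lowered characters
def pvScanB' : List Char → List Char → List String
  | curr, [] => if curr = [] then [] else [String.ofList curr]
  | curr, c :: cs =>
    if pvAlnumChar c then pvScanB' (curr ++ [c]) cs
    else if curr = [] then pvScanB' [] cs
    else String.ofList curr :: pvScanB' [] cs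

theorem pvAlnumCode_eq (c : Char) : pvAlnumCode ((c.toNat : Int)) = pvAlnumChar c := by
  unfold pvAlnumCode pvAlnumChar
  congr 1 <;> congr 1 <;> apply decide_eq_decide.mpr <;> omega

theorem pvOfNat_code (c : Char) : Char.ofNat (((c.toNat : Int)).toNat) = c := by
  simp [Char.ofNat_toNat]

theorem pvLoopA_eq (cs : List Char) : ∀ (curr : List Char) (words : List String),
    pvLoopA (cs ++ ['\n']) curr words
      = words ++ pvScanB' curr (cs.map PySem.Chars.lowerChar) := by
  induction cs with
  | nil =>
    intro curr words
    have h10 : pvAlnumCode (((PySem.Chars.lowerChar '\n').toNat : Int)) = false := by decide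
    simp only [List.nil_append, List.map_nil, pvLoopA, pvScanB', h10, if_false,
      Bool.false_eq_true]
    rcases curr with _ | ⟨c, curr⟩ <;> simp
  | cons c cs ih =>
    intro curr words
    simp only [List.cons_append, List.map_cons, pvLoopA, pvScanB',
      pvAlnumCode_eq (PySem.Chars.lowerChar c), pvOfNat_code]
    by_cases h : pvAlnumChar (PySem.Chars.lowerChar c)
    · simp [h, ih]
    · rcases curr with _ | ⟨d, curr⟩ <;> simp [h, ih]

theorem pvScanB'_eq (lows : List Char) : ∀ (curr : List Char),
    pvScanB' curr lows
      = if curr = [] then pvScanB lows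
        else String.ofList (curr ++ lows.takeWhile pvAlnumChar)
              :: pvScanB (lows.dropWhile pvAlnumChar) := by
  induction lows with
  | nil =>
    intro curr
    rcases curr with _ | ⟨c, curr⟩ <;> simp [pvScanB', pvScanB]
  | cons c cs ih =>
    intro curr
    by_cases h : pvAlnumChar c
    · rcases curr with _ | ⟨d, curr⟩ <;>
        simp [pvScanB', pvScanB, h, ih]
    · rcases curr with _ | ⟨d, curr⟩ <;>
        simp [pvScanB', pvScanB, h, ih]

-- ===== VERDICT (by name: the statement is the Claim_ definition above) =====
theorem get_alphanumeric_words_from_line_spec : Claim_equal_get_alphanumeric_words_from_line := by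
  intro line _
  unfold Spec_get_alphanumeric_words_from_line
  unfold get_alphanumeric_words_from_line get_alphanumeric_words_from_line_alt
  rw [pvLoopA_eq, pvScanB'_eq]
  simp
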